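-- pv_equiv track=rewrite | github.com/naveenkumarrk/PROBLEM-OF-THE-DAY | LEETCODE/2582 pass thepillow.py | pillow_problem
-- ===== SOURCE A (Python) =====
-- def pillow_problem(n, time):
--     is_left_to_right = True
--     pos = 1
--     for i in range(1, n+1):
--         if is_left_to_right:
--             pos += 1
--         else:
--             pos -= 1
--         if i % (n-1) == 0:
--             is_left_to_right = not is_left_to_right
--     return pos
-- ===== SOURCE B (Python) =====
-- def pillow_problem(n, time):
--     # Closed form: after n steps the pillow ends at n-1 for n >= 2;
--     # with no one to pass to (n <= 1) it stays at 1. (time is unused, as in A.)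
--     if n <= 1:
--         return 1
--     return n - 1
-- ===== Notes on version B (the rewrite author's own statement) =====
-- stated objective: faster
-- what changed: Replaced the O(n) step-by-step simulation (direction flag flipped at multiples of n-1) with the closed-form answer n-1 for n>=2 and 1 for n<=0.
import Mathlib
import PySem

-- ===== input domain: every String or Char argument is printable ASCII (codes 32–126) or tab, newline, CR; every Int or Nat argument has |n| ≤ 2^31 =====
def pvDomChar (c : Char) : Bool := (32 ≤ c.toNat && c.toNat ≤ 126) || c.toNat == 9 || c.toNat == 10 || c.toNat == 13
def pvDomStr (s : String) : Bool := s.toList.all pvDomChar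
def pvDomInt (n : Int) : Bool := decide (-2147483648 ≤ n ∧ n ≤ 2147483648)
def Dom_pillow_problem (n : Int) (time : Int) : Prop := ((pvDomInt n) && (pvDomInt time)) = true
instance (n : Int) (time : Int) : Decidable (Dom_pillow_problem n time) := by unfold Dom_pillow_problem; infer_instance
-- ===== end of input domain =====

-- B replaces A's O(n) step-by-step simulation with the O(1) closed form (n-1 for n ≥ 2, else 1);
-- `time` is unused by A and by B alike.

-- ===== PORT A =====
-- literal transliteration of A: fold over range(1, n+1) carrying (is_left_to_right, pos)
def pillow_problem (n : Int) (time : Int) : Int :=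
  ((PySem.List.pyRange 1 (n+1) 1).foldl
    (fun (st : Bool × Int) i =>
      let pos := if st.1 then st.2 + 1 else st.2 - 1
      ((if PySem.Int.mod i (n-1) == 0 then !st.1 else st.1), pos))
    (true, 1)).2

-- ===== PORT B =====
def pillow_problem_alt (n : Int) (time : Int) : Int :=
  if n ≤ 1 then 1 else n - 1

-- ===== PRECONDITION & SPEC =====
-- Pre_ excludes exactly n = 1, where A raises ZeroDivisionError (i % (n-1) with n-1 = 0).
def Pre_pillow_problem (n : Int) (time : Int) : Prop := n ≠ 1
instance (n : Int) (time : Int) : Decidable (Pre_pillow_problem n time) := by unfold Pre_pillow_problem; infer_instance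
def pvWitness_pillow_problem : Int × Int := (5, 3)

def Spec_pillow_problem (n : Int) (time : Int) (out : Int) : Prop := out = pillow_problem_alt n time
instance (n : Int) (time : Int) (out : Int) : Decidable (Spec_pillow_problem n time out) := by unfold Spec_pillow_problem; infer_instance

-- ===== CLAIM (what is proved, stated in full; the proofs are below) =====
def Claim_equal_pillow_problem : Prop := ∀ (n : Int) (time : Int), Dom_pillow_problem n time → Pre_pillow_problem n time → Spec_pillow_problem n time (pillow_problem n time)

-- ===== LEMMAS AND PROOFS =====

-- A's loop body, abstracted over n.
def pillowStep (n : Int) (st : Bool × Int) (i : Int) : Bool × Int :=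
  let pos := if st.1 then st.2 + 1 else st.2 - 1
  ((if PySem.Int.mod i (n-1) == 0 then !st.1 else st.1), pos)

theorem pillow_problem_eq_foldl (n time : Int) :
    pillow_problem n time
      = ((PySem.List.pyRange 1 (n+1) 1).foldl (pillowStep n) (true, 1)).2 := rfl

-- invariant: after steps i = 1 .. k (k ≤ n-1, n ≥ 2) the state is
-- (true, 1+k) while k < n-1, and (false, n) at k = n-1.
theorem pillow_invariant (n : Int) (hn : 2 ≤ n) :
    ∀ (k : Nat), (k : Int) ≤ n - 1 →
      (PySem.List.pyRange 1 (1 + (k : Int)) 1).foldl (pillowStep n) (true, 1)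
        = (if (k : Int) = n - 1 then (false, n) else (true, 1 + (k : Int))) := by
  intro k
  induction k with
  | zero =>
      intro _
      rw [show ((0 : Nat) : Int) = 0 from rfl]
      rw [PySem.List.pyRange_one_eq_nil (by omega)]
      rw [if_neg (by omega)]
      norm_num
  | succ m ih =>
      intro hk
      have hm : (m : Int) ≤ n - 1 := by push_cast at hk ⊢; omega
      have hmlt : (m : Int) < n - 1 := by push_cast at hk; omega
      have hsplit : PySem.List.pyRange 1 (1 + ((m + 1 : Nat) : Int)) 1
          = PySem.List.pyRange 1 (1 + (m : Int)) 1 ++ [1 + (m : Int)] := by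
        have h := PySem.List.pyRange_one_succ_right
          (a := 1) (b := 1 + (m : Int)) (by omega)
        push_cast
        rw [show (1 : Int) + ((m : Int) + 1) = (1 + (m : Int)) + 1 by ring, h]
      rw [hsplit, List.foldl_append, ih hm, if_neg (by omega)]
      have hmod : PySem.Int.mod (1 + (m : Int)) (n - 1) = ((1 + (m : Int)) % (n - 1)) :=
        PySem.Int.mod_eq_emod_of_pos (by omega)
      by_cases hlast : (1 + (m : Int)) = n - 1
      · have h0 : PySem.Int.mod (1 + (m : Int)) (n - 1) = 0 := by
          rw [hmod, hlast, Int.emod_self]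
        rw [if_pos (by push_cast; omega)]
        simp [pillowStep, h0]
        omega
      · have hlt : 1 + (m : Int) < n - 1 := by omega
        have h0 : PySem.Int.mod (1 + (m : Int)) (n - 1) ≠ 0 := by
          rw [hmod, Int.emod_eq_of_lt (by omega) hlt]
          omega
        rw [if_neg (by push_cast; omega)]
        simp [pillowStep, h0]
        ring

theorem pillow_closed (n time : Int) (hn : 2 ≤ n) :
    pillow_problem n time = n - 1 := by
  rw [pillow_problem_eq_foldl]
  have hk : ((n - 1).toNat : Int) = n - 1 := by omega
  have hsplit : PySem.List.pyRange 1 (n + 1) 1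
      = PySem.List.pyRange 1 (1 + ((n - 1).toNat : Int)) 1 ++ [n] := by
    have h := PySem.List.pyRange_one_succ_right (a := 1) (b := n) (by omega)
    rw [hk, show (1 : Int) + (n - 1) = n by ring, h]
  rw [hsplit, List.foldl_append,
      pillow_invariant n hn (n - 1).toNat (le_of_eq hk), if_pos hk]
  simp [pillowStep]

theorem pillow_empty (n time : Int) (hn : n ≤ 0) :
    pillow_problem n time = 1 := by
  rw [pillow_problem_eq_foldl, PySem.List.pyRange_one_eq_nil (by omega)]
  rfl

-- ===== VERDICT (by name: the statement is the Claim_ definition above) =====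
theorem pillow_problem_spec : Claim_equal_pillow_problem := by
  intro n time _ hpre
  unfold Spec_pillow_problem pillow_problem_alt
  by_cases h : n ≤ 1
  · have h0 : n ≤ 0 := by
      rcases lt_or_eq_of_le h with h' | h'
      · omega
      · exact absurd h' hpre
    rw [pillow_empty n time h0, if_pos h]
  · rw [pillow_closed n time (by omega), if_neg h]
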